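-- pv_equiv track=rewrite | github.com/andre6e/linkedin-scraper | premium-urls-scraper/classes/Helpers.py | elab_url_from_config
-- ===== SOURCE A (Python) =====
-- PEOPLE_BASE_URL = 'https://www.linkedin.com/sales/search/people?'
--
-- MULTI_FILTER_CONJ = '%2C'
--
-- GEO_FILTER_QUERY_PARAM = 'geoIncluded'
--
-- COMPANY_SIZE_FILTER_QUERY_PARAM = 'companySize'
--
-- INDUSTRIES_INCLUDED_FILTER_QUERY_PARAM = 'industryIncluded'
--
-- def elab_url_from_config(FILTER_LOCATION, FILTER_NEMPLOYEES, FILTER_INDRUSTRIES):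
--     geo_filter_length = len(FILTER_LOCATION)
--     nemployees_filter_length = len(FILTER_NEMPLOYEES)
--     industries_filter_length = len(FILTER_INDRUSTRIES)
--
--     url_to_search = ''
--     first_filter_added = 0
--
--     # GEO FILTER
--     if geo_filter_length != 0 and FILTER_LOCATION[0] != '':
--         first_filter_added = 1
--         url_to_search = PEOPLE_BASE_URL + GEO_FILTER_QUERY_PARAM + '='
--
--         if geo_filter_length == 1:
--             url_to_search += FILTER_LOCATION[0]
--         else:
--             for i, geo_key in enumerate(FILTER_LOCATION):
--                 geo_key = geo_key.replace(" ", "")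
--
--                 url_to_search += geo_key
--
--                 if i+1 != len(FILTER_LOCATION):
--                     url_to_search += MULTI_FILTER_CONJ
--
--     # N. EMPLOYEES FILTER
--     if nemployees_filter_length != 0 and FILTER_NEMPLOYEES[0] != '':
--         if first_filter_added == 0:
--             first_filter_added = 1
--             url_to_search = PEOPLE_BASE_URL + COMPANY_SIZE_FILTER_QUERY_PARAM + '='
--         else:
--             url_to_search += '&' + COMPANY_SIZE_FILTER_QUERY_PARAM + '='
--
--
--         if nemployees_filter_length == 1:
--             url_to_search += FILTER_NEMPLOYEES[0]
--         else:
--             for i, nemmp_key in enumerate(FILTER_NEMPLOYEES):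
--                 nemmp_key = nemmp_key.replace(" ", "")
--
--                 url_to_search += nemmp_key
--
--                 if i+1 != len(FILTER_NEMPLOYEES):
--                     url_to_search += MULTI_FILTER_CONJ
--
--     # INDUSTRIES FILTER
--     if industries_filter_length != 0 and FILTER_INDRUSTRIES[0] != '':
--         if first_filter_added == 0:
--             first_filter_added = 1
--             url_to_search = PEOPLE_BASE_URL + INDUSTRIES_INCLUDED_FILTER_QUERY_PARAM + '='
--         else:
--             url_to_search += '&' + INDUSTRIES_INCLUDED_FILTER_QUERY_PARAM + '='
--
--         if industries_filter_length == 1: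
--             url_to_search += FILTER_INDRUSTRIES[0]
--         else:
--             for i, industry_key in enumerate(FILTER_INDRUSTRIES):
--                 industry_key = industry_key.replace(" ", "")
--
--                 url_to_search += industry_key
--
--                 if i+1 != len(FILTER_INDRUSTRIES):
--                     url_to_search += MULTI_FILTER_CONJ
--
--     url_to_search += '&page=1'
--     return url_to_search
-- ===== SOURCE B (Python) =====
-- PEOPLE_BASE_URL = 'https://www.linkedin.com/sales/search/people?'
--
-- MULTI_FILTER_CONJ = '%2C'
--
-- GEO_FILTER_QUERY_PARAM = 'geoIncluded'
--
-- COMPANY_SIZE_FILTER_QUERY_PARAM = 'companySize'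
--
-- INDUSTRIES_INCLUDED_FILTER_QUERY_PARAM = 'industryIncluded'
--
--
-- def _value(lst):
--     # single key as-is; otherwise append 'strippedkey%2C' for every key and trim the trailing separator
--     if len(lst) == 1:
--         return lst[0]
--     s = ''
--     for k in lst:
--         s += k.replace(' ', '') + MULTI_FILTER_CONJ
--     return s[:-3]  # len(MULTI_FILTER_CONJ) == 3
--
--
-- def _build(pairs):
--     # recursively build the query string back-to-front, every segment '&'-prefixed
--     if not pairs:
--         return ''
--     (param, lst), rest = pairs[0], pairs[1:]
--     tail = _build(rest)
--     if len(lst) != 0 and lst[0] != '':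
--         return '&' + param + '=' + _value(lst) + tail
--     return tail
--
--
-- def elab_url_from_config(FILTER_LOCATION, FILTER_NEMPLOYEES, FILTER_INDRUSTRIES):
--     qs = _build([(GEO_FILTER_QUERY_PARAM, FILTER_LOCATION),
--                  (COMPANY_SIZE_FILTER_QUERY_PARAM, FILTER_NEMPLOYEES),
--                  (INDUSTRIES_INCLUDED_FILTER_QUERY_PARAM, FILTER_INDRUSTRIES)])
--     if qs == '':
--         return '&page=1'
--     return PEOPLE_BASE_URL + qs[1:] + '&page=1'
-- ===== Notes on version B (the rewrite author's own statement) =====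
-- stated objective: alternative
-- what changed: Replaces A's flag-driven sequential mutation of one URL string (first_filter_added plus three copy-pasted blocks) with back-to-front recursion over a (param, list) pair list that builds a uniformly '&'-prefixed query string, slicing off the leading '&' and prepending the base URL at the end; the multi-value join is a separate recursive helper instead of an enumerate loop with an index test.
import Mathlib
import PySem

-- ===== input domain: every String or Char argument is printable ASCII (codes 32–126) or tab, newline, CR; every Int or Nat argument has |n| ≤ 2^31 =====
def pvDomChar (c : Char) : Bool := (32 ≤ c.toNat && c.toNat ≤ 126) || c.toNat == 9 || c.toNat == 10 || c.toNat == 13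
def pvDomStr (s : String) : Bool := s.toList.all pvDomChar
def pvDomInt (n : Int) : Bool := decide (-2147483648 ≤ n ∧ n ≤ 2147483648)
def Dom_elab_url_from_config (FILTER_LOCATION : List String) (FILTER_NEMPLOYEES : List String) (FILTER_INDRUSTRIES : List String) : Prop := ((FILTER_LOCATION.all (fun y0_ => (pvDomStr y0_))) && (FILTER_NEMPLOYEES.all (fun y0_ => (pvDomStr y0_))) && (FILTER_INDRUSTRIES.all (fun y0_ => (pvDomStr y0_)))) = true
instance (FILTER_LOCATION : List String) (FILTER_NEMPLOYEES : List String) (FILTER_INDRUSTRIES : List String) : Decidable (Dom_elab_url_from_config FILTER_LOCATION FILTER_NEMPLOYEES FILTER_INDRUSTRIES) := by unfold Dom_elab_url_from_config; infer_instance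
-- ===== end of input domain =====

-- B replaces A's first_filter_added flag and three copy-pasted blocks by recursion: it builds
-- the query back-to-front over a pair list, with every segment '&'-prefixed, then drops the
-- leading '&' with a slice and prepends the base URL (objective: simpler; same cost).

-- ===== PORT A =====
-- literal transliteration: sequential state (url_to_search, first_filter_added), three blocks
def elab_url_from_config (FILTER_LOCATION : List String) (FILTER_NEMPLOYEES : List String) (FILTER_INDRUSTRIES : List String) : String :=
  let geo_filter_length := FILTER_LOCATION.length
  let nemployees_filter_length := FILTER_NEMPLOYEES.length
  let industries_filter_length := FILTER_INDRUSTRIES.length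
  let url_to_search : String := ""
  let first_filter_added : Nat := 0
  -- GEO FILTER
  let st1 : String × Nat :=
    if geo_filter_length ≠ 0 ∧ FILTER_LOCATION.headD "" ≠ "" then
      let u := "https://www.linkedin.com/sales/search/people?" ++ "geoIncluded" ++ "="
      let u :=
        if geo_filter_length = 1 then u ++ FILTER_LOCATION.headD ""
        else (PySem.List.enumerate FILTER_LOCATION).foldl (fun acc ik =>
          let k := PySem.Str.replace ik.2 " " ""
          let acc := acc ++ k
          if ik.1 + 1 ≠ (FILTER_LOCATION.length : Int) then acc ++ "%2C" else acc) u
      (u, 1)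
    else (url_to_search, first_filter_added)
  -- N. EMPLOYEES FILTER
  let st2 : String × Nat :=
    if nemployees_filter_length ≠ 0 ∧ FILTER_NEMPLOYEES.headD "" ≠ "" then
      let u :=
        if st1.2 = 0 then "https://www.linkedin.com/sales/search/people?" ++ "companySize" ++ "="
        else st1.1 ++ "&" ++ "companySize" ++ "="
      let u :=
        if nemployees_filter_length = 1 then u ++ FILTER_NEMPLOYEES.headD ""
        else (PySem.List.enumerate FILTER_NEMPLOYEES).foldl (fun acc ik =>
          let k := PySem.Str.replace ik.2 " " ""
          let acc := acc ++ k
          if ik.1 + 1 ≠ (FILTER_NEMPLOYEES.length : Int) then acc ++ "%2C" else acc) u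
      (u, 1)
    else st1
  -- INDUSTRIES FILTER
  let st3 : String × Nat :=
    if industries_filter_length ≠ 0 ∧ FILTER_INDRUSTRIES.headD "" ≠ "" then
      let u :=
        if st2.2 = 0 then "https://www.linkedin.com/sales/search/people?" ++ "industryIncluded" ++ "="
        else st2.1 ++ "&" ++ "industryIncluded" ++ "="
      let u :=
        if industries_filter_length = 1 then u ++ FILTER_INDRUSTRIES.headD ""
        else (PySem.List.enumerate FILTER_INDRUSTRIES).foldl (fun acc ik =>
          let k := PySem.Str.replace ik.2 " " ""
          let acc := acc ++ k
          if ik.1 + 1 ≠ (FILTER_INDRUSTRIES.length : Int) then acc ++ "%2C" else acc) u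
      (u, 1)
    else st2
  st3.1 ++ "&page=1"

-- ===== PORT B =====
-- Source B's _value: single key as-is; else append 'strippedkey%2C' per key, trim trailing 3 chars
def pvValue (lst : List String) : String :=
  if lst.length = 1 then lst.headD ""
  else PySem.Str.slice
    (lst.foldl (fun s k => s ++ PySem.Str.replace k " " "" ++ "%2C") "") none (some (-3))

-- Source B's _build: back-to-front recursion over the pair list, every segment '&'-prefixed
def pvBuild : List (String × List String) → String
  | [] => ""
  | (param, lst) :: rest =>
    let tail := pvBuild rest
    if lst.length ≠ 0 ∧ lst.headD "" ≠ "" then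
      "&" ++ param ++ "=" ++ pvValue lst ++ tail
    else tail

def elab_url_from_config_alt (FILTER_LOCATION : List String) (FILTER_NEMPLOYEES : List String) (FILTER_INDRUSTRIES : List String) : String :=
  let qs := pvBuild [("geoIncluded", FILTER_LOCATION), ("companySize", FILTER_NEMPLOYEES),
                     ("industryIncluded", FILTER_INDRUSTRIES)]
  if qs = "" then "&page=1"
  else "https://www.linkedin.com/sales/search/people?" ++ PySem.Str.slice qs (some 1) none ++ "&page=1"

-- ===== PRECONDITION & SPEC =====
def Spec_elab_url_from_config (FILTER_LOCATION : List String) (FILTER_NEMPLOYEES : List String) (FILTER_INDRUSTRIES : List String) (out : String) : Prop := out = elab_url_from_config_alt FILTER_LOCATION FILTER_NEMPLOYEES FILTER_INDRUSTRIES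
instance (FILTER_LOCATION : List String) (FILTER_NEMPLOYEES : List String) (FILTER_INDRUSTRIES : List String) (out : String) : Decidable (Spec_elab_url_from_config FILTER_LOCATION FILTER_NEMPLOYEES FILTER_INDRUSTRIES out) := by unfold Spec_elab_url_from_config; infer_instance

-- ===== CLAIM (what is proved, stated in full; the proofs are below) =====
def Claim_equal_elab_url_from_config : Prop := ∀ (FILTER_LOCATION : List String) (FILTER_NEMPLOYEES : List String) (FILTER_INDRUSTRIES : List String), Dom_elab_url_from_config FILTER_LOCATION FILTER_NEMPLOYEES FILTER_INDRUSTRIES → Spec_elab_url_from_config FILTER_LOCATION FILTER_NEMPLOYEES FILTER_INDRUSTRIES (elab_url_from_config FILTER_LOCATION FILTER_NEMPLOYEES FILTER_INDRUSTRIES)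

-- ===== LEMMAS AND PROOFS =====

-- proof-side canonical value: the '%2C'-join of space-stripped keys, no trailing separator
def pvStripJoin : List String → String
  | [] => ""
  | [k] => PySem.Str.replace k " " ""
  | k :: rest => PySem.Str.replace k " " "" ++ "%2C" ++ pvStripJoin rest

-- B's over-append loop, run from any accumulator
theorem pvFold_acc (lst : List String) : ∀ s0 : String,
    lst.foldl (fun s k => s ++ PySem.Str.replace k " " "" ++ "%2C") s0
    = s0 ++ lst.foldl (fun s k => s ++ PySem.Str.replace k " " "" ++ "%2C") "" := by
  induction lst with
  | nil => intro s0; simp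
  | cons k t ih =>
    intro s0
    simp only [List.foldl_cons]
    rw [ih (s0 ++ PySem.Str.replace k " " "" ++ "%2C"),
        ih ("" ++ PySem.Str.replace k " " "" ++ "%2C")]
    simp [String.append_assoc]

-- B's over-append loop = canonical join plus one trailing separator
theorem pvFold_eq_join (lst : List String) (hne : lst ≠ []) :
    lst.foldl (fun s k => s ++ PySem.Str.replace k " " "" ++ "%2C") ""
    = pvStripJoin lst ++ "%2C" := by
  induction lst with
  | nil => exact absurd rfl hne
  | cons k t ih =>
    cases t with
    | nil => simp [pvStripJoin]
    | cons y t' =>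
      rw [List.foldl_cons, pvFold_acc (y :: t'), ih (by simp)]
      simp [pvStripJoin, String.append_assoc]

-- trimming the trailing '%2C' recovers the canonical join
theorem pvSliceVal (lst : List String) (hne : lst ≠ []) :
    PySem.Str.slice
      (lst.foldl (fun s k => s ++ PySem.Str.replace k " " "" ++ "%2C") "") none (some (-3))
    = pvStripJoin lst := by
  rw [pvFold_eq_join lst hne]
  apply String.toList_inj.mp
  simp only [PySem.Str.toList_slice, PySem.Chars.slice_eq_listSlice]
  rw [PySem.List.slice_to_neg_ofNat _ 3 (by omega)]
  rw [String.toList_append]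
  have hlen : ((pvStripJoin lst).toList ++ ("%2C" : String).toList).length - 3
      = (pvStripJoin lst).toList.length := by simp
  rw [hlen, List.take_left]

-- A's multi-element loop over one filter list equals u ++ pvStripJoin of the remaining keys
theorem pvLoop_eq (lst : List String) : ∀ (rest : List String) (s : Int) (u : String),
    rest ≠ [] → s + rest.length = (lst.length : Int) →
    (PySem.List.enumerate rest s).foldl (fun acc ik =>
      let k := PySem.Str.replace ik.2 " " ""
      let acc := acc ++ k
      if ik.1 + 1 ≠ (lst.length : Int) then acc ++ "%2C" else acc) u
    = u ++ pvStripJoin rest := by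
  intro rest
  induction rest with
  | nil => intro s u h _; exact absurd rfl h
  | cons x t ih =>
    intro s u _ htot
    cases t with
    | nil =>
      have hs : s + 1 = (lst.length : Int) := by simpa using htot
      simp [PySem.List.enumerate_cons, PySem.List.enumerate_nil, hs, pvStripJoin]
    | cons y t' =>
      have hne : s + 1 ≠ (lst.length : Int) := by
        simp only [List.length_cons] at htot; push_cast at htot; omega
      have htot' : (s + 1) + (↑(y :: t').length) = (lst.length : Int) := by
        simp only [List.length_cons] at htot ⊢; push_cast at htot ⊢; omega
      rw [PySem.List.enumerate_cons, List.foldl_cons]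
      simp only [hne, if_pos, ne_eq, not_false_iff]
      rw [ih (s + 1) _ (by simp) htot']
      simp [pvStripJoin, String.append_assoc]

-- A's per-filter value-if equals u ++ B's per-filter value
theorem pvVal_eq (lst : List String) (hne : lst ≠ []) (u : String) :
    (if lst.length = 1 then u ++ lst.headD ""
     else (PySem.List.enumerate lst).foldl (fun acc ik =>
       let k := PySem.Str.replace ik.2 " " ""
       let acc := acc ++ k
       if ik.1 + 1 ≠ (lst.length : Int) then acc ++ "%2C" else acc) u)
    = u ++ pvValue lst := by
  by_cases hlen : lst.length = 1
  · simp [pvValue, hlen]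
  · simp only [pvValue, hlen, if_false]
    rw [pvLoop_eq lst lst 0 u hne (by simp), pvSliceVal lst hne]

-- dropping the leading '&' of a '&'-prefixed segment string (B's qs[1:])
theorem pvSliceGeo (x : String) : PySem.Str.slice ("&geoIncluded=" ++ x) (some 1) none = "geoIncluded=" ++ x := by
  apply String.toList_inj.mp
  simp only [PySem.Str.toList_slice, PySem.Chars.slice_eq_listSlice, zero_le_one,
    PySem.List.slice_from, Int.toNat_one, List.drop_one, String.toList_append]
  simp

theorem pvSliceCS (x : String) : PySem.Str.slice ("&companySize=" ++ x) (some 1) none = "companySize=" ++ x := by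
  apply String.toList_inj.mp
  simp only [PySem.Str.toList_slice, PySem.Chars.slice_eq_listSlice, zero_le_one,
    PySem.List.slice_from, Int.toNat_one, List.drop_one, String.toList_append]
  simp

theorem pvSliceInd (x : String) : PySem.Str.slice ("&industryIncluded=" ++ x) (some 1) none = "industryIncluded=" ++ x := by
  apply String.toList_inj.mp
  simp only [PySem.Str.toList_slice, PySem.Chars.slice_eq_listSlice, zero_le_one,
    PySem.List.slice_from, Int.toNat_one, List.drop_one, String.toList_append]
  simp

theorem pvBaseGeo (x : String) : ("https://www.linkedin.com/sales/search/people?" : String) ++ ("geoIncluded=" ++ x) = "https://www.linkedin.com/sales/search/people?geoIncluded=" ++ x := by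
  apply String.toList_inj.mp
  simp

theorem pvBaseCS (x : String) : ("https://www.linkedin.com/sales/search/people?" : String) ++ ("companySize=" ++ x) = "https://www.linkedin.com/sales/search/people?companySize=" ++ x := by
  apply String.toList_inj.mp
  simp

theorem pvBaseInd (x : String) : ("https://www.linkedin.com/sales/search/people?" : String) ++ ("industryIncluded=" ++ x) = "https://www.linkedin.com/sales/search/people?industryIncluded=" ++ x := by
  apply String.toList_inj.mp
  simp

set_option maxHeartbeats 1000000 in
theorem elab_url_from_config_spec : Claim_equal_elab_url_from_config := by
  intro L N I _
  show elab_url_from_config L N I = elab_url_from_config_alt L N I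
  by_cases h1 : ¬L = [] ∧ ¬L.head?.getD "" = "" <;>
  by_cases h2 : ¬N = [] ∧ ¬N.head?.getD "" = "" <;>
  by_cases h3 : ¬I = [] ∧ ¬I.head?.getD "" = "" <;>
    simp only [elab_url_from_config, elab_url_from_config_alt, pvBuild] <;>
    (try rw [pvVal_eq L h1.1]) <;>
    (try rw [pvVal_eq N h2.1]) <;>
    (try rw [pvVal_eq I h3.1]) <;>
    simp [h1, h2, h3, pvSliceGeo, pvSliceCS, pvSliceInd, pvBaseGeo, pvBaseCS, pvBaseInd, String.append_assoc]
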